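-- pv_equiv track=rewrite | github.com/OoLongTeaNoSugar/coding_practice | vivo.py | lihe
-- ===== SOURCE A (Python) =====
-- def lihe(s):
--     count = 0
--     for i in s:
--         if i == '(':
--             count += 1
--         if i == ')':
--             count -= 1
--         if i == '0':
--             break
--     return count
-- ===== SOURCE B (Python) =====
-- def lihe(s):
--     head = s.partition('0')[0]
--     return head.count('(') - head.count(')')
-- ===== Notes on version B (the rewrite author's own statement) =====
-- stated objective: simpler
-- what changed: Replaces the fused scan-with-break by truncating at the first '0' via partition and then two separate count passes (C-level built-ins instead of a Python-level loop).
import Mathlib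
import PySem

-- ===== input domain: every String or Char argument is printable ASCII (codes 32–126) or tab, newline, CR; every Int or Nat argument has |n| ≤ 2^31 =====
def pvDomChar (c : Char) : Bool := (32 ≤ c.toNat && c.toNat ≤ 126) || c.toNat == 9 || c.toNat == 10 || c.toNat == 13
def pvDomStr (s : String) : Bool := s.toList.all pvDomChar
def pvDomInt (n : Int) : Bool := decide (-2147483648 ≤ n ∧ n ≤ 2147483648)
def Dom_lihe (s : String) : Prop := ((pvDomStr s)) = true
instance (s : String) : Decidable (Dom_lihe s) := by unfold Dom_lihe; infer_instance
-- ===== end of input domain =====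

-- B truncates at the first '0' (partition) and then counts '(' and ')' in two separate passes,
-- instead of A's single fused scan-with-break; same result, simpler decomposition.

-- ===== PORT A =====
-- the for-loop with break, step for step
def liheGo : List Char → Int → Int
  | [], count => count
  | i :: rest, count =>
    let count := if i = '(' then count + 1 else count
    let count := if i = ')' then count - 1 else count
    if i = '0' then count else liheGo rest count

def lihe (s : String) : Int := liheGo s.toList 0

-- ===== PORT B =====
def lihe_alt (s : String) : Int :=
  let head := s.toList.takeWhile (· ≠ '0')   -- s.partition('0')[0]
  (head.count '(' : Int) - (head.count ')' : Int)

-- ===== PRECONDITION & SPEC =====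
def Spec_lihe (s : String) (out : Int) : Prop := out = lihe_alt s
instance (s : String) (out : Int) : Decidable (Spec_lihe s out) := by unfold Spec_lihe; infer_instance

-- ===== CLAIM (what is proved, stated in full; the proofs are below) =====
def Claim_equal_lihe : Prop := ∀ (s : String), Dom_lihe s → Spec_lihe s (lihe s)

-- ===== LEMMAS AND PROOFS =====
theorem liheGo_eq (l : List Char) (c : Int) :
    liheGo l c = c + ((l.takeWhile (· ≠ '0')).count '(' : Int)
                   - ((l.takeWhile (· ≠ '0')).count ')' : Int) := by
  induction l generalizing c with
  | nil => simp [liheGo]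
  | cons i rest ih =>
    by_cases h0 : i = '0'
    · subst h0
      simp [liheGo, List.takeWhile]
    · simp only [liheGo, if_neg h0, ih]
      by_cases hl : i = '('
      · subst hl
        simp [List.takeWhile]
        omega
      · by_cases hr : i = ')'
        · subst hr
          simp [List.takeWhile]
          omega
        · simp [List.takeWhile, h0, List.count_cons, hl, hr,
            Ne.symm hl, Ne.symm hr]

-- ===== VERDICT (by name: the statement is the Claim_ definition above) =====
theorem lihe_spec : Claim_equal_lihe := by
  intro s _
  unfold Spec_lihe lihe lihe_alt
  simpa using liheGo_eq s.toList 0
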